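-- pv_equiv track=rewrite | github.com/gepmat/Projet_IDH | python/GeneOntology.py | liste_trois_ontologies
-- ===== SOURCE A (Python) =====
-- def liste_trois_ontologies(liste1,liste2,liste3): # on trouve ici les Gene products présents dans les 3 ontologies
-- 	seen = liste1 + liste2 + liste3
-- 	seen = sorted(seen)
-- 	present = []
-- 	for i in range(len(seen)-2):
-- 		   if seen[i] == seen[i+1] and seen[i+1] == seen[i+2]:
-- 					 present.append(seen[i])
-- 	return(list(present))
-- ===== SOURCE B (Python) =====
-- def liste_trois_ontologies(liste1, liste2, liste3):
--     # Count occurrences in a dict instead of sorting the whole concatenation;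
--     # only the distinct values are sorted, and each value with count c is
--     # emitted c-2 times (empty when c < 3, since [v] * (negative or 0) == []).
--     counts = {}
--     for v in liste1 + liste2 + liste3:
--         counts[v] = counts.get(v, 0) + 1
--     present = []
--     for v in sorted(counts):
--         present += [v] * (counts[v] - 2)
--     return present
-- ===== Notes on version B (the rewrite author's own statement) =====
-- stated objective: alternative
-- what changed: Replaces A's sort-the-whole-concatenation plus sliding 3-window scan by a dict occurrence counter: only the distinct values are sorted and each value with count c is emitted c-2 times, so the sorted concatenation is never built or scanned.
import Mathlib
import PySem

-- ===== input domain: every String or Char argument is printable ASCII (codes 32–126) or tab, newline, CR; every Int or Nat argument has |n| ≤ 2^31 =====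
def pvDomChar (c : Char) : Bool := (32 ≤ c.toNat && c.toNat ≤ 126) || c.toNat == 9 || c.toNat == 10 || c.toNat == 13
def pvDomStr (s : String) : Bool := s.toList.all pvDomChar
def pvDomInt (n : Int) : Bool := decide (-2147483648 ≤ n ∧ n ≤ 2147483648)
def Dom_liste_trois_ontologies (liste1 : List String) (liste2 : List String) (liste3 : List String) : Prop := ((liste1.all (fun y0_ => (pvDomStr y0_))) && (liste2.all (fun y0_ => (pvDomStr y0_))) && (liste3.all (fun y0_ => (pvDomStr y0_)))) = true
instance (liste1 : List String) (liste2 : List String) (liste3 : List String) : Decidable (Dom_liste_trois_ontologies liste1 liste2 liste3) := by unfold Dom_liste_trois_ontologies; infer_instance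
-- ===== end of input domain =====

-- B replaces A's sort-of-the-whole-concatenation + sliding 3-window scan by a
-- dict occurrence counter: only the distinct values are sorted, each value with
-- count c is emitted c-2 times (objective: alternative algorithm).

-- ===== PORT A =====
def liste_trois_ontologies (liste1 : List String) (liste2 : List String) (liste3 : List String) : List String :=
  let seen := PySem.List.sorted (liste1 ++ liste2 ++ liste3) (fun x => x) false
  (PySem.List.pyRange 0 ((seen.length : Int) - 2) 1).foldl
    (fun present i =>
      if PySem.List.pyGetD seen i "" = PySem.List.pyGetD seen (i + 1) "" ∧
         PySem.List.pyGetD seen (i + 1) "" = PySem.List.pyGetD seen (i + 2) ""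
      then present ++ [PySem.List.pyGetD seen i ""]
      else present) []

-- ===== PORT B =====
def liste_trois_ontologies_alt (liste1 : List String) (liste2 : List String) (liste3 : List String) : List String :=
  let counts : PySem.Dict String Int :=
    (liste1 ++ liste2 ++ liste3).foldl (fun d v => d.insert v (d.getD v 0 + 1)) PySem.Dict.empty
  let keys := PySem.List.sorted counts.keys (fun x => x) false
  keys.foldl (fun present v => present ++ List.replicate (counts.getD v 0 - 2).toNat v) []

-- ===== PRECONDITION & SPEC =====
def Spec_liste_trois_ontologies (liste1 : List String) (liste2 : List String) (liste3 : List String) (out : List String) : Prop := out = liste_trois_ontologies_alt liste1 liste2 liste3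
instance (liste1 : List String) (liste2 : List String) (liste3 : List String) (out : List String) : Decidable (Spec_liste_trois_ontologies liste1 liste2 liste3 out) := by unfold Spec_liste_trois_ontologies; infer_instance

-- ===== CLAIM =====
def Claim_equal_liste_trois_ontologies : Prop := ∀ (liste1 : List String) (liste2 : List String) (liste3 : List String), Dom_liste_trois_ontologies liste1 liste2 liste3 → Spec_liste_trois_ontologies liste1 liste2 liste3 (liste_trois_ontologies liste1 liste2 liste3)

-- ===== LEMMAS AND PROOFS =====

-- the equal-consecutive-triples scan that characterises A's window loop
def scan3 : List String → List String
  | a :: b :: c :: r => (if a = b ∧ b = c then [a] else []) ++ scan3 (b :: c :: r)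
  | _ => []

theorem scan3_cons_ne (a b : String) (t : List String) (h : a ≠ b) :
    scan3 (a :: b :: t) = scan3 (b :: t) := by
  cases t with
  | nil => simp [scan3]
  | cons c r => simp [scan3, h]

-- A's index loop, rewritten over Nat indices, equals scan3
theorem aloop_nat (xs : List String) : ∀ (out : List String),
    (List.range (xs.length - 2)).foldl
      (fun acc k =>
        if xs.getD k "" = xs.getD (k + 1) "" ∧ xs.getD (k + 1) "" = xs.getD (k + 2) ""
        then acc ++ [xs.getD k ""] else acc) out = out ++ scan3 xs := by
  induction xs with
  | nil => intro out; simp [scan3]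
  | cons a t ih =>
    intro out
    match t with
    | [] => simp [scan3]
    | [b] => simp [scan3]
    | b :: c :: r =>
      have hlen : (a :: b :: c :: r).length - 2 = ((b :: c :: r).length - 2) + 1 := by
        simp
      rw [hlen, List.range_succ_eq_map, List.foldl_cons, List.foldl_map]
      have hstep : ∀ (acc : List String) (k : Nat),
          (if (a :: b :: c :: r).getD (k + 1) "" = (a :: b :: c :: r).getD (k + 1 + 1) "" ∧
              (a :: b :: c :: r).getD (k + 1 + 1) "" = (a :: b :: c :: r).getD (k + 1 + 2) ""
           then acc ++ [(a :: b :: c :: r).getD (k + 1) ""] else acc)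
          = (if (b :: c :: r).getD k "" = (b :: c :: r).getD (k + 1) "" ∧
                (b :: c :: r).getD (k + 1) "" = (b :: c :: r).getD (k + 2) ""
             then acc ++ [(b :: c :: r).getD k ""] else acc) := by
        intro acc k
        rfl
      simp only [hstep]
      have h0 : (if (a :: b :: c :: r).getD 0 "" = (a :: b :: c :: r).getD (0 + 1) "" ∧
              (a :: b :: c :: r).getD (0 + 1) "" = (a :: b :: c :: r).getD (0 + 2) ""
           then out ++ [(a :: b :: c :: r).getD 0 ""] else out)
          = out ++ (if a = b ∧ b = c then [a] else []) := by
        simp [List.getD]; split_ifs <;> simp_all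
      rw [h0, ih]
      simp [scan3]

theorem afold_eq_scan3 (xs : List String) :
    (PySem.List.pyRange 0 ((xs.length : Int) - 2) 1).foldl
      (fun present i =>
        if PySem.List.pyGetD xs i "" = PySem.List.pyGetD xs (i + 1) "" ∧
           PySem.List.pyGetD xs (i + 1) "" = PySem.List.pyGetD xs (i + 2) ""
        then present ++ [PySem.List.pyGetD xs i ""]
        else present) [] = scan3 xs := by
  rw [PySem.List.pyRange_one]
  have hcast : ((xs.length : Int) - 2 - 0).toNat = xs.length - 2 := by omega
  rw [hcast, List.foldl_map]
  have hstep : ∀ (acc : List String) (k : Nat),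
      (if PySem.List.pyGetD xs ((0:Int) + k) "" = PySem.List.pyGetD xs ((0:Int) + k + 1) "" ∧
          PySem.List.pyGetD xs ((0:Int) + k + 1) "" = PySem.List.pyGetD xs ((0:Int) + k + 2) ""
       then acc ++ [PySem.List.pyGetD xs ((0:Int) + k) ""] else acc)
      = (if xs.getD k "" = xs.getD (k + 1) "" ∧ xs.getD (k + 1) "" = xs.getD (k + 2) ""
         then acc ++ [xs.getD k ""] else acc) := by
    intro acc k
    have e1 : (0:Int) + k = ((k : Nat) : Int) := by ring
    have e2 : (0:Int) + k + 1 = (((k + 1 : Nat)) : Int) := by push_cast; ring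
    have e3 : (0:Int) + k + 2 = (((k + 2 : Nat)) : Int) := by push_cast; ring
    rw [e3, e2, e1, PySem.List.pyGetD_natCast, PySem.List.pyGetD_natCast, PySem.List.pyGetD_natCast]
  simp only [hstep]
  exact aloop_nat xs []

-- scan3 over a leading run of c copies of v drops two of them
theorem scan3_run (v : String) (w : List String)
    (hw : ∀ y, w.head? = some y → y ≠ v) :
    ∀ c : Nat, scan3 (List.replicate c v ++ w) = List.replicate (c - 2) v ++ scan3 w := by
  intro c
  induction c using Nat.strong_induction_on with
  | _ c ih =>
    match c with
    | 0 => simp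
    | 1 =>
      simp only [List.replicate, List.nil_append, List.cons_append]
      cases w with
      | nil => simp [scan3]
      | cons b r =>
        have hb : v ≠ b := fun h => (hw b rfl) h.symm
        simpa using scan3_cons_ne v b r hb
    | 2 =>
      simp only [List.replicate, List.nil_append, List.cons_append]
      cases w with
      | nil => simp [scan3]
      | cons b r =>
        have hb : v ≠ b := fun h => (hw b rfl) h.symm
        have h1 : scan3 (v :: v :: b :: r) = scan3 (v :: b :: r) := by
          simp [scan3, hb]
        rw [h1, scan3_cons_ne v b r hb]
    | (n + 3) =>
      have hrep : List.replicate (n + 3) v ++ w = v :: v :: v :: (List.replicate n v ++ w) := by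
        simp [List.replicate_succ]
      have hrep2 : (v : String) :: v :: (List.replicate n v ++ w) = List.replicate (n + 2) v ++ w := by
        simp [List.replicate_succ]
      rw [hrep, show scan3 (v :: v :: v :: (List.replicate n v ++ w))
            = [v] ++ scan3 (v :: v :: (List.replicate n v ++ w)) by simp [scan3],
          hrep2, ih (n + 2) (by omega)]
      simp [List.replicate_succ]

-- count of an element in a flatMap of replicates over distinct keys
theorem count_flatMap_rep (f : String → Nat) (a : String) :
    ∀ (K : List String), K.Nodup →
      (K.flatMap fun v => List.replicate (f v) v).count a = if a ∈ K then f a else 0 := by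
  intro K
  induction K with
  | nil => simp
  | cons k K' ih =>
    intro hnd
    rw [List.flatMap_cons, List.count_append, List.count_replicate,
        ih (List.Nodup.of_cons hnd)]
    by_cases hak : a = k
    · subst hak
      have : a ∉ K' := (List.nodup_cons.mp hnd).1
      simp [this]
    · have hka : (k == a) = false := by
        simp only [beq_eq_false_iff_ne, ne_eq]
        exact fun h => hak h.symm
      simp [hka, hak]

theorem perm_flatMap_rep (xs K : List String) (hnd : K.Nodup)
    (hmem : ∀ a, a ∈ K ↔ a ∈ xs) :
    (K.flatMap fun v => List.replicate (xs.count v) v).Perm xs := by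
  rw [List.perm_iff_count]
  intro a
  rw [count_flatMap_rep (fun v => xs.count v) a K hnd]
  by_cases ha : a ∈ K
  · simp [ha]
  · have : a ∉ xs := fun h => ha ((hmem a).mpr h)
    simp [ha, List.count_eq_zero.mpr this]

-- a flatMap of replicates over a strictly increasing key list is ≤-sorted
theorem pairwise_flatMap_rep (f : String → Nat) :
    ∀ (K : List String), K.Pairwise (· < ·) →
      (K.flatMap fun v => List.replicate (f v) v).Pairwise (· ≤ ·) := by
  intro K
  induction K with
  | nil => simp
  | cons k K' ih =>
    intro hp
    rw [List.flatMap_cons, List.pairwise_append]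
    refine ⟨List.pairwise_replicate.mpr (Or.inr le_rfl), ih (List.Pairwise.of_cons hp), ?_⟩
    intro x hx y hy
    have hxk : x = k := List.eq_of_mem_replicate hx
    obtain ⟨w, hw, hyw⟩ := List.mem_flatMap.mp hy
    have hyw' : y = w := List.eq_of_mem_replicate hyw
    have : k < w := (List.pairwise_cons.mp hp).1 w hw
    rw [hxk, hyw']
    exact le_of_lt this

-- the sorted concatenation is the flatMap of count-replicates over the sorted distinct values
theorem sorted_eq_flatMap (xs : List String) :
    PySem.List.sorted xs (fun x => x) false
      = (PySem.List.sorted (PySem.Set.ofList xs) (fun x => x) false).flatMap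
          (fun v => List.replicate (xs.count v) v) := by
  have hplt := PySem.List.sorted_ofList_pairwise_lt xs
  have hnd : (PySem.List.sorted (PySem.Set.ofList xs) (fun x => x) false).Nodup :=
    hplt.imp (fun h => ne_of_lt h)
  have hmem : ∀ a, a ∈ PySem.List.sorted (PySem.Set.ofList xs) (fun x => x) false ↔ a ∈ xs := by
    intro a
    rw [PySem.List.mem_sorted, PySem.Set.mem_ofList]
  exact PySem.List.sorted_id_eq_of_perm_of_pairwise _ _
    (perm_flatMap_rep xs _ hnd hmem)
    (pairwise_flatMap_rep (fun v => xs.count v) _ hplt)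

-- scan3 on the flatMap of replicates drops two copies of each value
theorem scan3_flatMap (f : String → Nat) :
    ∀ (K : List String), K.Pairwise (· < ·) →
      scan3 (K.flatMap fun v => List.replicate (f v) v)
        = K.flatMap fun v => List.replicate (f v - 2) v := by
  intro K
  induction K with
  | nil => simp [scan3]
  | cons k K' ih =>
    intro hp
    rw [List.flatMap_cons, List.flatMap_cons]
    have hhead : ∀ y, (K'.flatMap fun v => List.replicate (f v) v).head? = some y → y ≠ k := by
      intro y hy
      have hmem : y ∈ K'.flatMap fun v => List.replicate (f v) v := List.mem_of_mem_head? hy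
      obtain ⟨w, hw, hyw⟩ := List.mem_flatMap.mp hmem
      have : y = w := List.eq_of_mem_replicate hyw
      subst this
      exact ne_of_gt ((List.pairwise_cons.mp hp).1 y hw)
    rw [scan3_run k _ hhead (f k), ih (List.Pairwise.of_cons hp)]

-- ===== VERDICT =====
theorem liste_trois_ontologies_spec : Claim_equal_liste_trois_ontologies := by
  intro l1 l2 l3 _
  unfold Spec_liste_trois_ontologies
  set xs := l1 ++ l2 ++ l3 with hxs
  have hA : liste_trois_ontologies l1 l2 l3 = scan3 (PySem.List.sorted xs (fun x => x) false) :=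
    afold_eq_scan3 (PySem.List.sorted xs (fun x => x) false)
  have hcounts : xs.foldl (fun d v => d.insert v (d.getD v 0 + 1)) PySem.Dict.empty
      = PySem.Dict.counter xs := PySem.Dict.foldl_insert_getD_add_one_eq_counter xs
  have hB : liste_trois_ontologies_alt l1 l2 l3
      = (PySem.List.sorted (PySem.Dict.counter xs).keys (fun x => x) false).foldl
          (fun present v =>
            present ++ List.replicate ((PySem.Dict.counter xs).getD v 0 - 2).toNat v) [] := by
    unfold liste_trois_ontologies_alt
    rw [← hxs, hcounts]
  rw [hA, hB, PySem.Dict.keys_counter, PySem.List.foldl_append_eq_flatMap]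
  have hfun : (fun v => List.replicate ((PySem.Dict.counter xs).getD v 0 - 2).toNat v)
      = fun v => List.replicate (xs.count v - 2) v := by
    funext v
    rw [PySem.Dict.getD_counter]
    congr 1
    omega
  rw [hfun, List.nil_append, sorted_eq_flatMap xs,
      scan3_flatMap (fun v => xs.count v) _ (PySem.List.sorted_ofList_pairwise_lt xs)]
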